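-- pv_equiv track=rewrite | github.com/pypi-data/pypi-mirror-302 | packages/phonon-to-json/phonon_to_json-0.0.3-py3-none-any.whl/phonon_to_json/src/phonon_to_json.py | make_it_pretty
-- ===== SOURCE A (Python) =====
-- def make_it_pretty(string):
--     """adds returns and tabs so the resulting json file is more readable
--
--     Args:
--         string (str): content for the json file
--
--     Returns:
--         content (str): content for the json file in a more readable format
--     """
--     content = ""
--     for ch in string:
--         if ch == "[" or ch == ",":
--             content += ch + "\n\t "
--         elif ch == "]":
--             content += "\n\t" + ch
--         else:
--             content += ch
--     return content
-- ===== SOURCE B (Python) =====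
-- def make_it_pretty(string):
--     """adds returns and tabs so the resulting json file is more readable"""
--     return string.replace("[", "[\n\t ").replace(",", ",\n\t ").replace("]", "\n\t]")
-- ===== Notes on version B (the rewrite author's own statement) =====
-- stated objective: simpler
-- what changed: Replaces the character-by-character loop with string accumulator by three whole-string str.replace passes (safe since no replacement text contains a trigger character).
import Mathlib
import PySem

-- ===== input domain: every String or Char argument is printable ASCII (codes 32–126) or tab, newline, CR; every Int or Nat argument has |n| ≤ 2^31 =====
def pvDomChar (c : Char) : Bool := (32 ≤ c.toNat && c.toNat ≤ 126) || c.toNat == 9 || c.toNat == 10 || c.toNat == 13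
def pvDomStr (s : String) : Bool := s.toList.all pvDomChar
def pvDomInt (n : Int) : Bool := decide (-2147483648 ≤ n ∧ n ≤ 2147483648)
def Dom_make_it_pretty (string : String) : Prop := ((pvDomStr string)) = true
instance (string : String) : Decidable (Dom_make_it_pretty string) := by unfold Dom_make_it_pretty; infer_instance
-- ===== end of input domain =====

-- B rewrites A's character loop as three whole-string replace passes (simpler decomposition, same result).

-- ===== PORT A =====
-- literal port of A: one pass over the characters, appending to a string accumulator
def make_it_pretty (string : String) : String :=
  string.toList.foldl (fun content ch =>
    if ch = '[' ∨ ch = ',' then content ++ (String.ofList [ch] ++ "\n\t ")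
    else if ch = ']' then content ++ ("\n\t" ++ String.ofList [ch])
    else content ++ String.ofList [ch]) ""

-- ===== PORT B =====
-- literal port of B: three chained str.replace passes
def make_it_pretty_alt (string : String) : String :=
  PySem.Str.replace (PySem.Str.replace (PySem.Str.replace string "[" "[\n\t ") "," ",\n\t ") "]" "\n\t]"

-- ===== PRECONDITION & SPEC =====
def Spec_make_it_pretty (string : String) (out : String) : Prop := out = make_it_pretty_alt string
instance (string : String) (out : String) : Decidable (Spec_make_it_pretty string out) := by unfold Spec_make_it_pretty; infer_instance

-- ===== CLAIM (what is proved, stated in full; the proofs are below) =====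
def Claim_equal_make_it_pretty : Prop := ∀ (string : String), Dom_make_it_pretty string → Spec_make_it_pretty string (make_it_pretty string)

-- ===== LEMMAS AND PROOFS =====

-- single-character replace is a flatMap of a per-character substitution
theorem replace_go_single (o : Char) (new : List Char) :
    ∀ (fuel : Nat) (l acc : List Char), l.length ≤ fuel →
      PySem.Chars.replace.go [o] new fuel l acc
        = acc.reverse ++ l.flatMap (fun c => if c = o then new else [c]) := by
  intro fuel
  induction fuel with
  | zero =>
    intro l acc h
    have : l = [] := List.eq_nil_of_length_eq_zero (Nat.le_zero.mp h)
    subst this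
    simp [PySem.Chars.replace.go]
  | succ n ih =>
    intro l acc h
    cases l with
    | nil => simp [PySem.Chars.replace.go]
    | cons c t =>
      by_cases hc : c = o
      · subst hc
        have hp : List.isPrefixOf [c] (c :: t) = true := by
          simp [List.isPrefixOf]
        rw [PySem.Chars.replace.go]
        simp only [hp, if_pos]
        have hd : List.drop [c].length (c :: t) = t := rfl
        rw [hd, ih t (new.reverse ++ acc) (by simpa using Nat.le_of_succ_le_succ h)]
        simp
      · have hp : List.isPrefixOf [o] (c :: t) = false := by
          simp [List.isPrefixOf, List.isPrefixOf_iff_prefix]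
          intro hco; exact absurd hco.symm hc
        rw [PySem.Chars.replace.go]
        simp only [hp]
        rw [ih t (c :: acc) (by simpa using Nat.le_of_succ_le_succ h)]
        simp [hc]

theorem replace_single (o : Char) (new l : List Char) :
    PySem.Chars.replace l [o] new = l.flatMap (fun c => if c = o then new else [c]) := by
  rw [PySem.Chars.replace]
  simp [replace_go_single o new l.length l [] (le_refl _)]

-- the per-character expansion both programs realise
def pvExpand (c : Char) : List Char :=
  if c = '[' ∨ c = ',' then c :: "\n\t ".toList
  else if c = ']' then "\n\t".toList ++ [c]
  else [c]

theorem foldl_A (l : List Char) :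
    ∀ acc : String,
      (l.foldl (fun content ch =>
        if ch = '[' ∨ ch = ',' then content ++ (String.ofList [ch] ++ "\n\t ")
        else if ch = ']' then content ++ ("\n\t" ++ String.ofList [ch])
        else content ++ String.ofList [ch]) acc).toList
      = acc.toList ++ l.flatMap pvExpand := by
  induction l with
  | nil => intro acc; simp
  | cons c t ih =>
    intro acc
    simp only [List.foldl_cons, List.flatMap_cons]
    by_cases h1 : c = '[' ∨ c = ','
    · rw [if_pos h1, ih]; simp [pvExpand, h1]
    · rw [if_neg h1]
      by_cases h2 : c = ']'
      · rw [if_pos h2, ih]; simp [pvExpand, h2]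
      · rw [if_neg h2, ih]; simp [pvExpand, h1, h2]

theorem expand_compose (c : Char) :
    ((if c = '[' then "[\n\t ".toList else [c]).flatMap
        (fun c => if c = ',' then ",\n\t ".toList else [c])).flatMap
        (fun c => if c = ']' then "\n\t]".toList else [c]) = pvExpand c := by
  by_cases h1 : c = '['
  · subst h1; decide
  · by_cases h2 : c = ','
    · subst h2; decide
    · by_cases h3 : c = ']'
      · subst h3; decide
      · simp [pvExpand, h1, h2, h3]

theorem alt_toList (s : String) :
    (make_it_pretty_alt s).toList = s.toList.flatMap pvExpand := by
  unfold make_it_pretty_alt PySem.Str.replace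
  simp only [String.toList_ofList]
  have e1 : "[".toList = ['['] := rfl
  have e2 : ",".toList = [','] := rfl
  have e3 : "]".toList = [']'] := rfl
  rw [e1, e2, e3, replace_single, replace_single, replace_single]
  rw [List.flatMap_assoc, List.flatMap_assoc]
  apply List.flatMap_congr
  intro c _
  rw [← List.flatMap_assoc]
  exact expand_compose c

-- ===== VERDICT (by name: the statement is the Claim_ definition above) =====
theorem make_it_pretty_spec : Claim_equal_make_it_pretty := by
  intro s _
  unfold Spec_make_it_pretty
  apply String.toList_injective
  rw [alt_toList]
  unfold make_it_pretty
  simpa using foldl_A s.toList ""
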